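-- pv_equiv track=rewrite | github.com/explainX/explainx_counterfactuals | WebApp/Functions.py | my_combinations
-- ===== SOURCE A (Python) =====
-- import copy
--
-- def my_combinations(target,data,limit):
-- 	# --- Finds the mathematical combinations using recursion ---
-- 	result = []
-- 	for i in range(len(data)):
-- 		new_target = copy.copy(target)
-- 		new_data = copy.copy(data)
-- 		new_target.append(data[i])
-- 		new_data = data[i+1:]
-- 		if (4 >= len(new_target) >= limit):
-- 			result.append(new_target)
-- 		result += my_combinations(new_target,new_data,limit)
-- 	return result
-- ===== SOURCE B (Python) =====
-- def my_combinations(target, data, limit):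
--     # Iterative stack-based DFS replacing A's recursion; pre-order preserved
--     # by pushing children in reverse onto a LIFO stack.
--     result = []
--     stack = [(target + [data[i]], data[i + 1:]) for i in range(len(data) - 1, -1, -1)]
--     while stack:
--         prefix, rest = stack.pop()
--         if limit <= len(prefix) <= 4:
--             result.append(prefix)
--         for i in range(len(rest) - 1, -1, -1):
--             stack.append((prefix + [rest[i]], rest[i + 1:]))
--     return result
-- ===== Notes on version B (the rewrite author's own statement) =====
-- stated objective: alternative
-- what changed: A's recursion (one recursive call per loop iteration, copying target/data) is replaced by an explicit stack-based DFS: a worklist of (prefix, rest) frames popped LIFO with children pushed in reverse, no recursion and no copy module.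
import Mathlib
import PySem

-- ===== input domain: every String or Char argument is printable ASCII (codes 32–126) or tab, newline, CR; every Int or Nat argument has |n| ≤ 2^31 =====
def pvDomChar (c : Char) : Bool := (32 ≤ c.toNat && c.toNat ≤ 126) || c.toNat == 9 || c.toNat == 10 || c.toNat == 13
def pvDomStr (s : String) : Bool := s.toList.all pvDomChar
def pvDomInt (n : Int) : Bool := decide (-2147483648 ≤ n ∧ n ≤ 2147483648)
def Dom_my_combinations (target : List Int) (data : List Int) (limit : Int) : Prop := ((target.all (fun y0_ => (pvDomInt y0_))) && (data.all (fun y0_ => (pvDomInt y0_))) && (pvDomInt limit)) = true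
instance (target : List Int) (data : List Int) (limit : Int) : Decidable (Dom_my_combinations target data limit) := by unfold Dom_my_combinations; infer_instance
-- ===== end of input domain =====

-- ===== PORT A =====
-- A builds fresh copies of target/data; only the return value is claimed (no observable mutation).
-- The index loop 'for i in range(len(data))' with data[i] and data[i+1:] is the
-- obvious structural recursion on data: iteration i=0 handles the head, i=1.. is the
-- same loop on the tail.
def my_combinations (target : List Int) (data : List Int) (limit : Int) : List (List Int) :=
  match data with
  | [] => []
  | d :: rest =>
    let new_target := target ++ [d]
    (if limit ≤ (new_target.length : Int) ∧ (new_target.length : Int) ≤ 4 then [new_target] else [])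
      ++ my_combinations new_target rest limit
      ++ my_combinations target rest limit

-- ===== PORT B =====
-- the seed/child frames: (prefix ++ [rest[i]], rest[i+1:]) for i = 0..len(rest)-1;
-- Python pushes them in reverse onto the stack, so they are popped in this forward order.
def pvChildren (pref : List Int) (rest : List Int) : List (List Int × List Int) :=
  match rest with
  | [] => []
  | x :: rs => (pref ++ [x], rs) :: pvChildren pref rs

def pvMeas (stack : List (List Int × List Int)) : Nat :=
  (stack.map (fun fr => 2 ^ fr.2.length)).sum

theorem pvMeas_append (a b : List (List Int × List Int)) : pvMeas (a ++ b) = pvMeas a + pvMeas b := by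
  simp [pvMeas]

theorem pvMeas_children (p r : List Int) : pvMeas (pvChildren p r) + 1 = 2 ^ r.length := by
  induction r generalizing p with
  | nil => simp [pvChildren, pvMeas]
  | cons x rs ih =>
    simp only [pvChildren, pvMeas, List.map_cons, List.sum_cons, List.length_cons, pow_succ]
    have h := ih p
    simp only [pvMeas] at h
    omega

theorem pvMeas_step (p r : List Int) (st : List (List Int × List Int)) :
    pvMeas (pvChildren p r ++ st) < pvMeas ((p, r) :: st) := by
  rw [pvMeas_append]
  have h := pvMeas_children p r
  simp only [pvMeas, List.map_cons, List.sum_cons] at h ⊢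
  omega

-- the while loop over the explicit stack
def pvAltLoop (limit : Int) (stack : List (List Int × List Int)) : List (List Int) :=
  match stack with
  | [] => []
  | (p, r) :: st =>
    (if limit ≤ (p.length : Int) ∧ (p.length : Int) ≤ 4 then [p] else [])
      ++ pvAltLoop limit (pvChildren p r ++ st)
termination_by pvMeas stack
decreasing_by exact pvMeas_step p r st

def my_combinations_alt (target : List Int) (data : List Int) (limit : Int) : List (List Int) :=
  pvAltLoop limit (pvChildren target data)

-- ===== PRECONDITION & SPEC =====

def Spec_my_combinations (target : List Int) (data : List Int) (limit : Int) (out : List (List Int)) : Prop := out = my_combinations_alt target data limit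
instance (target : List Int) (data : List Int) (limit : Int) (out : List (List Int)) : Decidable (Spec_my_combinations target data limit out) := by unfold Spec_my_combinations; infer_instance

-- ===== CLAIM (what is proved, stated in full; the proofs are below) =====
def Claim_equal_my_combinations : Prop := ∀ (target : List Int) (data : List Int) (limit : Int), Dom_my_combinations target data limit → Spec_my_combinations target data limit (my_combinations target data limit)

-- ===== LEMMAS AND PROOFS =====

theorem pvAltLoop_children (limit : Int) (p r : List Int) (st : List (List Int × List Int)) :
    pvAltLoop limit (pvChildren p r ++ st) = my_combinations p r limit ++ pvAltLoop limit st := by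
  induction r generalizing p st with
  | nil => simp [pvChildren, my_combinations]
  | cons x rs ih =>
    rw [pvChildren, List.cons_append, pvAltLoop, my_combinations]
    have h1 := ih (p ++ [x]) (pvChildren p rs ++ st)
    have h2 := ih p st
    simp only [List.append_assoc] at *
    rw [h1, h2]


-- ===== VERDICT (by name: the statement is the Claim_ definition above) =====
theorem my_combinations_spec : Claim_equal_my_combinations := by
  intro target data limit _
  unfold Spec_my_combinations my_combinations_alt
  have h := pvAltLoop_children limit target data []
  rw [show pvChildren target data = pvChildren target data ++ [] by simp, h]
  simp [pvAltLoop]
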